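-- pv_equiv track=rewrite | github.com/Wo-m/pub_golf_teams | brute.py | valid_teams_combiniation
-- ===== SOURCE A (Python) =====
-- def valid_teams_combiniation(team_comb):
--     """
--     is this team combination valid?
--     i.e. groups of 5 teams s.t. no person is in 2 teams
--     """
--     people_set = set()
--     for team in team_comb:
--         for p in team:
--             if p in people_set: # someone is in two teams
--                 return False
--             people_set.add(p)
--     return True
-- ===== SOURCE B (Python) =====
-- def valid_teams_combiniation(team_comb):
--     """
--     is this team combination valid?
--     i.e. groups of 5 teams s.t. no person is in 2 teams
--     """
--     people = set()
--     for team in team_comb: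
--         people.update(team)
--     return sum(len(team) for team in team_comb) == len(people)
-- ===== Notes on version B (the rewrite author's own statement) =====
-- stated objective: alternative
-- what changed: Replaces the incremental per-person membership test with early exit by two aggregate passes: total slot count compared against the size of the union set of all teams.
import Mathlib
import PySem

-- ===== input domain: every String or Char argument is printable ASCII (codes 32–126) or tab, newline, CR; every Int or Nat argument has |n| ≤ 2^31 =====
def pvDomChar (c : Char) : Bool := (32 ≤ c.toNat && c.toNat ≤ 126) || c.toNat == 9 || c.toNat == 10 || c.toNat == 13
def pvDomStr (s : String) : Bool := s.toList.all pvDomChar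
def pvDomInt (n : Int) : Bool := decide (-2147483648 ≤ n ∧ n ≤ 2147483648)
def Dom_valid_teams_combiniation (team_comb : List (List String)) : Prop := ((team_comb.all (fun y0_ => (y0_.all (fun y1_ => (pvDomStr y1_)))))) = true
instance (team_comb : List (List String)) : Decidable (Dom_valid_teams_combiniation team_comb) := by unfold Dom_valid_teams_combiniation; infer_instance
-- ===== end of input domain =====

-- B replaces A's incremental membership-with-early-exit scan by two aggregate passes:
-- total slot count compared with the size of the union set of all teams (alternative, same cost).


-- ===== PORT A =====
-- inner loop: 'for p in team: if p in people_set: return False; people_set.add(p)'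
-- none = the early 'return False' fired
def vtcInner : List String → PySem.Set String → Option (PySem.Set String)
  | [], s => some s
  | p :: ps, s => if PySem.Set.contains s p then none else vtcInner ps (PySem.Set.add s p)

-- outer loop: 'for team in team_comb: …'
def vtcOuter : List (List String) → PySem.Set String → Bool
  | [], _ => true
  | t :: ts, s =>
    match vtcInner t s with
    | none => false
    | some s' => vtcOuter ts s'

def valid_teams_combiniation (team_comb : List (List String)) : Bool :=
  vtcOuter team_comb PySem.Set.empty

-- ===== PORT B =====
def valid_teams_combiniation_alt (team_comb : List (List String)) : Bool :=
  let people := team_comb.foldl (fun s t => PySem.Set.update s t) PySem.Set.empty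
  decide (((team_comb.map List.length).sum : Int) = PySem.Set.len people)

-- ===== PRECONDITION & SPEC =====
def Spec_valid_teams_combiniation (team_comb : List (List String)) (out : Bool) : Prop := out = valid_teams_combiniation_alt team_comb
instance (team_comb : List (List String)) (out : Bool) : Decidable (Spec_valid_teams_combiniation team_comb out) := by unfold Spec_valid_teams_combiniation; infer_instance

-- ===== CLAIM (what is proved, stated in full; the proofs are below) =====
def Claim_equal_valid_teams_combiniation : Prop := ∀ (team_comb : List (List String)), Dom_valid_teams_combiniation team_comb → Spec_valid_teams_combiniation team_comb (valid_teams_combiniation team_comb)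

-- ===== LEMMAS AND PROOFS =====

theorem len_update_le (l : List String) (s : PySem.Set String) :
    (PySem.Set.update s l).length ≤ s.length + l.length := by
  induction l generalizing s with
  | nil => simp [PySem.Set.update]
  | cons p ps ih =>
    have hadd : (PySem.Set.add s p).length ≤ s.length + 1 := by
      simp only [PySem.Set.add]; split_ifs <;> simp
    have hupd : PySem.Set.update s (p :: ps) = PySem.Set.update (PySem.Set.add s p) ps := by
      simp [PySem.Set.update]
    rw [hupd, List.length_cons]
    have := ih (PySem.Set.add s p)
    omega

-- A's inner loop returns the updated set exactly when every person of the team is new;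
-- otherwise the deduplicated update is strictly shorter than length-sum.
theorem inner_char (t : List String) (s : PySem.Set String) :
    (match vtcInner t s with
     | some s' => s' = PySem.Set.update s t ∧
         (PySem.Set.update s t).length = s.length + t.length
     | none => (PySem.Set.update s t).length < s.length + t.length) := by
  induction t generalizing s with
  | nil => simp [vtcInner, PySem.Set.update]
  | cons p ps ih =>
    by_cases hc : PySem.Set.contains s p
    · have hmem : p ∈ s := by simpa [PySem.Set.contains] using hc
      have hadd : PySem.Set.add s p = s := by simp [PySem.Set.add, hmem]
      have hupd : PySem.Set.update s (p :: ps) = PySem.Set.update s ps := by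
        simp [PySem.Set.update, hadd]
      rw [show vtcInner (p :: ps) s = none from by simp [vtcInner, hmem]]
      rw [hupd, List.length_cons]
      have := len_update_le ps s
      omega
    · have hmem : p ∉ s := by simpa [PySem.Set.contains] using hc
      have hadd : PySem.Set.add s p = s ++ [p] := by simp [PySem.Set.add, hmem]
      have hlen : (PySem.Set.add s p).length = s.length + 1 := by rw [hadd]; simp
      have hupd : PySem.Set.update s (p :: ps) = PySem.Set.update (PySem.Set.add s p) ps := by
        simp [PySem.Set.update]
      rw [show vtcInner (p :: ps) s = vtcInner ps (PySem.Set.add s p) from by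
        simp [vtcInner, hmem]]
      have h := ih (PySem.Set.add s p)
      cases hin : vtcInner ps (PySem.Set.add s p) with
      | none =>
        rw [hin] at h
        rw [hupd, List.length_cons]
        omega
      | some s' =>
        rw [hin] at h
        obtain ⟨h1, h2⟩ := h
        refine ⟨by rw [hupd, h1], ?_⟩
        rw [hupd, List.length_cons]
        omega

-- A's whole loop returns True exactly when the union set absorbed every slot,
-- i.e. its size equals the total slot count.
theorem outer_char (ts : List (List String)) (s : PySem.Set String) :
    (ts.foldl (fun a t => PySem.Set.update a t) s).length ≤ s.length + (ts.map List.length).sum ∧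
    (vtcOuter ts s = true ↔
      (ts.foldl (fun a t => PySem.Set.update a t) s).length = s.length + (ts.map List.length).sum) := by
  induction ts generalizing s with
  | nil => simp [vtcOuter]
  | cons t rest ih =>
    have hi := inner_char t s
    simp only [List.foldl_cons, List.map_cons, List.sum_cons]
    cases hin : vtcInner t s with
    | none =>
      rw [hin] at hi
      obtain ⟨hle, _⟩ := ih (PySem.Set.update s t)
      constructor
      · omega
      · simp only [vtcOuter, hin]
        constructor
        · intro h; cases h
        · intro h; omega
    | some s' =>
      rw [hin] at hi
      obtain ⟨h1, h2⟩ := hi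
      rw [← h1] at h2
      rw [show PySem.Set.update s t = s' from h1.symm]
      obtain ⟨hle, hiff⟩ := ih s'
      constructor
      · omega
      · simp only [vtcOuter, hin]
        rw [hiff]
        omega

-- ===== VERDICT (by name: the statement is the Claim_ definition above) =====
theorem valid_teams_combiniation_spec : Claim_equal_valid_teams_combiniation := by
  intro tc _
  unfold Spec_valid_teams_combiniation valid_teams_combiniation valid_teams_combiniation_alt
  obtain ⟨hle, hiff⟩ := outer_char tc PySem.Set.empty
  have hemp : (PySem.Set.empty : PySem.Set String).length = 0 := rfl
  rw [hemp] at hle hiff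
  have hlen : PySem.Set.len (tc.foldl (fun s t => PySem.Set.update s t) PySem.Set.empty)
      = ((tc.foldl (fun s t => PySem.Set.update s t) PySem.Set.empty).length : Int) := rfl
  simp only [hlen, Nat.cast_inj]
  by_cases hb : vtcOuter tc PySem.Set.empty = true
  · rw [hb]
    have := hiff.mp hb
    symm
    rw [decide_eq_true_iff]
    omega
  · rw [Bool.eq_false_iff.mpr hb]
    symm
    rw [decide_eq_false_iff_not]
    intro hEq
    exact hb (hiff.mpr (by omega))
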